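-- pv_equiv track=rewrite | github.com/thom-heinrich/twinr | src/twinr/ops/pi_runtime_deploy.py | _iter_systemd_assignments
-- ===== SOURCE A (Python) =====
-- def _iter_systemd_assignments(service_text: str) -> tuple[tuple[str | None, str, str], ...]:
--     """Yield logical ``(section, key, value)`` assignments from one systemd unit file."""
--
--     section: str | None = None
--     logical_lines: list[str] = []
--     buffer = ""
--     for raw_line in str(service_text or "").splitlines():
--         line = raw_line.rstrip("\n")
--         stripped = line.lstrip()
--         if buffer:
--             if not stripped or stripped.startswith(("#", ";")):
--                 continue
--             continuation = line.rstrip()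
--             if continuation.endswith("\\"):
--                 buffer += continuation[:-1] + " "
--                 continue
--             logical_lines.append(buffer + continuation)
--             buffer = ""
--             continue
--         if not stripped or stripped.startswith(("#", ";")):
--             continue
--         if line.rstrip().endswith("\\"):
--             buffer = line.rstrip()[:-1] + " "
--             continue
--         logical_lines.append(line)
--     if buffer:
--         logical_lines.append(buffer)
--
--     assignments: list[tuple[str | None, str, str]] = []
--     for raw_line in logical_lines:
--         stripped = raw_line.strip()
--         if not stripped:
--             continue
--         if stripped.startswith("[") and stripped.endswith("]"):
--             section = stripped
--             continue
--         if "=" not in raw_line: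
--             continue
--         raw_key, raw_value = raw_line.split("=", 1)
--         key = raw_key.strip()
--         if not key:
--             continue
--         value = raw_value.strip()
--         assignments.append((section, key, value))
--     return tuple(assignments)
-- ===== SOURCE B (Python) =====
-- def _iter_systemd_assignments(service_text: str) -> tuple[tuple[str | None, str, str], ...]:
--     """Single-pass parser: threads the continuation buffer and the current section
--     through one loop over splitlines(), classifying each logical line immediately."""
--
--     section: str | None = None
--     out: list[tuple[str | None, str, str]] = []
--
--     def emit(logical: str) -> None:
--         nonlocal section
--         stripped = logical.strip()
--         if not stripped:
--             return
--         if stripped.startswith("[") and stripped.endswith("]"):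
--             section = stripped
--             return
--         if "=" not in logical:
--             return
--         raw_key, raw_value = logical.split("=", 1)
--         key = raw_key.strip()
--         if key:
--             out.append((section, key, raw_value.strip()))
--
--     buffer = ""
--     for raw_line in str(service_text or "").splitlines():
--         line = raw_line.rstrip("\n")
--         stripped = line.lstrip()
--         if not stripped or stripped.startswith(("#", ";")):
--             continue
--         trimmed = line.rstrip()
--         if trimmed.endswith("\\"):
--             buffer += trimmed[:-1] + " "
--         elif buffer:
--             emit(buffer + trimmed)
--             buffer = ""
--         else:
--             emit(line)
--     if buffer:
--         emit(buffer)
--     return tuple(out)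
-- ===== Notes on version B (the rewrite author's own statement) =====
-- stated objective: simpler
-- what changed: B replaces A's two sequential passes (build a logical_lines list, then classify it) with a single pass that threads the continuation buffer and the current section together and classifies each logical line via emit() the moment it completes, merging A's duplicated blank/comment and backslash-continuation branches and eliminating the intermediate list.
import Mathlib
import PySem

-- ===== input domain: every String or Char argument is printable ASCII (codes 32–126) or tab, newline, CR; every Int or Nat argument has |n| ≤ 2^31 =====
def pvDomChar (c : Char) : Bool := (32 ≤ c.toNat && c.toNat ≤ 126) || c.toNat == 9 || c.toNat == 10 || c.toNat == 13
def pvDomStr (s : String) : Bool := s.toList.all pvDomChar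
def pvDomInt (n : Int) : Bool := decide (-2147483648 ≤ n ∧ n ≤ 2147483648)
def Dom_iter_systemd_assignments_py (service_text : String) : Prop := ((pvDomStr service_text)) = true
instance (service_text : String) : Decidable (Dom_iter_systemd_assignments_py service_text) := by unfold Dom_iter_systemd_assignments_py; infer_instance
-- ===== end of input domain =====

-- B fuses A's two passes into a single loop that threads the continuation buffer and the
-- current section together, classifying each logical line the moment it completes
-- (objective: simpler — no intermediate logical_lines list).

-- ===== PORT A =====

-- exact port of str.rstrip("\n"): drop trailing '\n' characters
def pvRstripNl (cs : List Char) : List Char :=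
  (cs.reverse.dropWhile (fun c => c == '\n')).reverse

-- body of A's first loop: state = (buffer, logical_lines)
def pvStepA (st : List Char × List (List Char)) (raw : List Char) :
    List Char × List (List Char) :=
  let line := pvRstripNl raw
  let stripped := PySem.Chars.lstrip line
  if st.1 ≠ [] then
    if stripped.isEmpty || PySem.Chars.startswith stripped ['#'] || PySem.Chars.startswith stripped [';'] then st
    else
      let continuation := PySem.Chars.rstrip line
      if PySem.Chars.endswith continuation ['\\'] then
        (st.1 ++ PySem.Chars.slice continuation none (some (-1)) ++ [' '], st.2)
      else ([], st.2 ++ [st.1 ++ continuation])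
  else
    if stripped.isEmpty || PySem.Chars.startswith stripped ['#'] || PySem.Chars.startswith stripped [';'] then st
    else if PySem.Chars.endswith (PySem.Chars.rstrip line) ['\\'] then
      (PySem.Chars.slice (PySem.Chars.rstrip line) none (some (-1)) ++ [' '], st.2)
    else (st.1, st.2 ++ [line])

-- body of A's second loop: state = (section, assignments)
def pvClassifyA (st : Option (List Char) × List (Option String × String × String))
    (raw : List Char) : Option (List Char) × List (Option String × String × String) :=
  let stripped := PySem.Chars.strip raw
  if stripped.isEmpty then st
  else if PySem.Chars.startswith stripped ['['] && PySem.Chars.endswith stripped [']'] then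
    (some stripped, st.2)
  else if !(PySem.Chars.isIn ['='] raw) then st
  else
    match PySem.Chars.splitOnMax raw ['='] 1 with   -- raw_line.split("=", 1)
    | [raw_key, raw_value] =>
        let key := PySem.Chars.strip raw_key
        if key.isEmpty then st
        else (st.1, st.2 ++ [(st.1.map String.ofList, String.ofList key, String.ofList (PySem.Chars.strip raw_value))])
    | _ => st   -- unreachable: split("=", 1) with "=" present yields exactly two parts

def iter_systemd_assignments_py (service_text : String) : List (Option String × String × String) :=
  let text := if service_text = "" then "" else service_text   -- str(service_text or "")
  let r := (PySem.Chars.splitlines text.toList).foldl pvStepA ([], [])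
  let logical_lines := if r.1 ≠ [] then r.2 ++ [r.1] else r.2
  (logical_lines.foldl pvClassifyA (none, [])).2

-- ===== PORT B =====

-- B's emit(): classify one completed logical line, updating (section, out)
def pvEmitB (st : Option (List Char) × List (Option String × String × String))
    (logical : List Char) : Option (List Char) × List (Option String × String × String) :=
  let stripped := PySem.Chars.strip logical
  if stripped.isEmpty then st
  else if PySem.Chars.startswith stripped ['['] && PySem.Chars.endswith stripped [']'] then
    (some stripped, st.2)
  else if !(PySem.Chars.isIn ['='] logical) then st
  else
    match PySem.Chars.splitOnMax logical ['='] 1 with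
    | [raw_key, raw_value] =>
        let key := PySem.Chars.strip raw_key
        if key.isEmpty then st
        else (st.1, st.2 ++ [(st.1.map String.ofList, String.ofList key, String.ofList (PySem.Chars.strip raw_value))])
    | _ => st

-- body of B's single loop: state = (buffer, (section, out))
def pvStepB
    (st : List Char × (Option (List Char) × List (Option String × String × String)))
    (raw : List Char) :
    List Char × (Option (List Char) × List (Option String × String × String)) :=
  let line := pvRstripNl raw
  let stripped := PySem.Chars.lstrip line
  if stripped.isEmpty || PySem.Chars.startswith stripped ['#'] || PySem.Chars.startswith stripped [';'] then st
  else
    let trimmed := PySem.Chars.rstrip line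
    if PySem.Chars.endswith trimmed ['\\'] then
      (st.1 ++ PySem.Chars.slice trimmed none (some (-1)) ++ [' '], st.2)
    else if st.1 ≠ [] then ([], pvEmitB st.2 (st.1 ++ trimmed))
    else (st.1, pvEmitB st.2 line)

def iter_systemd_assignments_py_alt (service_text : String) : List (Option String × String × String) :=
  let text := if service_text = "" then "" else service_text   -- str(service_text or "")
  let r := (PySem.Chars.splitlines text.toList).foldl pvStepB ([], (none, []))
  (if r.1 ≠ [] then pvEmitB r.2 r.1 else r.2).2

-- ===== PRECONDITION & SPEC =====
def Spec_iter_systemd_assignments_py (service_text : String) (out : List (Option String × String × String)) : Prop := out = iter_systemd_assignments_py_alt service_text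
instance (service_text : String) (out : List (Option String × String × String)) : Decidable (Spec_iter_systemd_assignments_py service_text out) := by unfold Spec_iter_systemd_assignments_py; infer_instance

-- ===== CLAIM (what is proved, stated in full; the proofs are below) =====
def Claim_equal_iter_systemd_assignments_py : Prop := ∀ (service_text : String), Dom_iter_systemd_assignments_py service_text → Spec_iter_systemd_assignments_py service_text (iter_systemd_assignments_py service_text)

-- ===== LEMMAS AND PROOFS =====

theorem pvEmitB_eq : pvEmitB = pvClassifyA := rfl

-- fusion invariant: running B's fused loop from (buffer, classify-fold of lls) equals
-- running A's first loop from (buffer, lls) and classify-folding its logical lines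
theorem pv_fuse (lines : List (List Char)) :
    ∀ (buffer : List Char) (st : Option (List Char) × List (Option String × String × String))
      (lls : List (List Char)),
    List.foldl pvStepB (buffer, List.foldl pvClassifyA st lls) lines
      = ((List.foldl pvStepA (buffer, lls) lines).1,
         List.foldl pvClassifyA st (List.foldl pvStepA (buffer, lls) lines).2) := by
  induction lines with
  | nil => intro buffer st lls; rfl
  | cons l ls ih =>
    intro buffer st lls
    simp only [List.foldl_cons]
    by_cases hskip : (PySem.Chars.lstrip (pvRstripNl l)).isEmpty
        || PySem.Chars.startswith (PySem.Chars.lstrip (pvRstripNl l)) ['#']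
        || PySem.Chars.startswith (PySem.Chars.lstrip (pvRstripNl l)) [';'] = true
    · have hA : pvStepA (buffer, lls) l = (buffer, lls) := by
        simp only [pvStepA]; split_ifs <;> simp_all
      have hB : pvStepB (buffer, List.foldl pvClassifyA st lls) l
          = (buffer, List.foldl pvClassifyA st lls) := by
        simp only [pvStepB]; split_ifs <;> simp_all
      rw [hA, hB, ih]
    · by_cases hcont : PySem.Chars.endswith (PySem.Chars.rstrip (pvRstripNl l)) ['\\'] = true
      · have hA : pvStepA (buffer, lls) l
            = (buffer ++ PySem.Chars.slice (PySem.Chars.rstrip (pvRstripNl l)) none (some (-1)) ++ [' '], lls) := by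
          simp only [pvStepA]
          by_cases hb : buffer = [] <;> split_ifs <;> simp_all
        have hB : pvStepB (buffer, List.foldl pvClassifyA st lls) l
            = (buffer ++ PySem.Chars.slice (PySem.Chars.rstrip (pvRstripNl l)) none (some (-1)) ++ [' '], List.foldl pvClassifyA st lls) := by
          simp only [pvStepB]; split_ifs <;> simp_all
        rw [hA, hB, ih]
      · by_cases hb : buffer = []
        · have hA : pvStepA (buffer, lls) l = (buffer, lls ++ [pvRstripNl l]) := by
            simp only [pvStepA]; split_ifs <;> simp_all
          have hB : pvStepB (buffer, List.foldl pvClassifyA st lls) l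
              = (buffer, List.foldl pvClassifyA st (lls ++ [pvRstripNl l])) := by
            simp only [pvStepB, pvEmitB_eq, List.foldl_append, List.foldl_cons, List.foldl_nil]
            split_ifs <;> simp_all
          rw [hA, hB, ih]
        · have hA : pvStepA (buffer, lls) l
              = ([], lls ++ [buffer ++ PySem.Chars.rstrip (pvRstripNl l)]) := by
            simp only [pvStepA]; split_ifs <;> simp_all
          have hB : pvStepB (buffer, List.foldl pvClassifyA st lls) l
              = ([], List.foldl pvClassifyA st (lls ++ [buffer ++ PySem.Chars.rstrip (pvRstripNl l)])) := by
            simp only [pvStepB, pvEmitB_eq, List.foldl_append, List.foldl_cons, List.foldl_nil]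
            split_ifs <;> simp_all
          rw [hA, hB, ih]

-- ===== VERDICT (by name: the statement is the Claim_ definition above) =====
theorem iter_systemd_assignments_py_spec : Claim_equal_iter_systemd_assignments_py := by
  intro service_text _
  unfold Spec_iter_systemd_assignments_py
  dsimp only [iter_systemd_assignments_py, iter_systemd_assignments_py_alt]
  have h := pv_fuse (PySem.Chars.splitlines (if service_text = "" then "" else service_text).toList)
      [] (none, []) []
  simp only [List.foldl_nil] at h
  rw [h]
  by_cases hb : (List.foldl pvStepA ([], []) (PySem.Chars.splitlines (if service_text = "" then "" else service_text).toList)).1 = []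
  · simp [hb]
  · simp [hb, pvEmitB_eq, List.foldl_append]
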